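-- pv_equiv track=rewrite | github.com/G-Gondin/Auaulas | luti.py | is2par
-- ===== SOURCE A (Python) =====
-- def is2par(cards):
--     ls = cards
--     a = []
--     repetidos = ""
--     for c in range(0, len(ls)):
--         a.append(ls[c][0])
--     for c in range(0, len(a)):
--         if a.count(a[c]) > 1:
--             if a[c] not in repetidos:
--                 repetidos += a[c]
--     if len(repetidos) == 2:
--         return True
--     else:
--         return False
-- ===== SOURCE B (Python) =====
-- def is2par(cards):
--     ranks = sorted(card[0] for card in cards)
--     pairs = 0
--     i = 0
--     n = len(ranks)
--     while i < n:
--         j = i + 1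
--         while j < n and ranks[j] == ranks[i]:
--             j += 1
--         if j - i > 1:
--             pairs += 1
--         i = j
--     return pairs == 2
-- ===== Notes on version B (the rewrite author's own statement) =====
-- stated objective: faster
-- what changed: A builds a rank list, rescans it with .count at every position and accumulates repeated ranks in a string with membership tests; B sorts the ranks once and does a single run-length scan over the sorted list, counting runs of length > 1 and returning whether there are exactly two.
import Mathlib
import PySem

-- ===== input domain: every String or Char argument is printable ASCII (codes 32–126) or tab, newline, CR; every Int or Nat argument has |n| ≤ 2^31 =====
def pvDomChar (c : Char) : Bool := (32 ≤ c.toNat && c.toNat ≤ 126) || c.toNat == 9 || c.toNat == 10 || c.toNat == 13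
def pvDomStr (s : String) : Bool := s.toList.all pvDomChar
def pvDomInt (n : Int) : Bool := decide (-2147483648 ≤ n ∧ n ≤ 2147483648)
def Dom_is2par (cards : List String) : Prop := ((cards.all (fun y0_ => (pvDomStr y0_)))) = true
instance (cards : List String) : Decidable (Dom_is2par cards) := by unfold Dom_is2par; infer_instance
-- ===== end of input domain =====

-- B sorts the first characters and counts runs of length > 1 in one scan over the
-- sorted list, instead of A's per-position .count rescans with a string accumulator
-- (objective: alternative — sort-then-scan instead of quadratic rescanning).

-- card[0] (both Pythons index the first character; Pre_ guarantees it exists)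
def pvRank (card : String) : Char := (PySem.Str.pyGet? card 0).getD ' '

-- ===== PORT A =====
def is2par (cards : List String) : Bool :=
  -- a = []; for c in range(0, len(ls)): a.append(ls[c][0])
  let a : List Char :=
    (PySem.List.pyRange 0 (PySem.List.len cards) 1).foldl
      (fun acc c => acc ++ [pvRank (PySem.List.pyGetD cards c "")]) []
  -- repetidos = ""; for c in range(0, len(a)): ...
  let repetidos : List Char :=
    (PySem.List.pyRange 0 (PySem.List.len a) 1).foldl
      (fun rep c =>
        let ch := PySem.List.pyGetD a c ' '
        if a.count ch > 1 then
          if ch ∈ rep then rep else rep ++ [ch]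
        else rep) []
  decide (repetidos.length = 2)

-- ===== PORT B =====
-- the outer while loop: i jumps to the end of the current run (inner while = the
-- maximal prefix of equal ranks), adding 1 to pairs when the run has length > 1
def pvScanRuns : List Char → Nat
  | [] => 0
  | x :: xs =>
    let run := xs.takeWhile (fun y => y == x)
    let rest := xs.dropWhile (fun y => y == x)
    (if run.length + 1 > 1 then 1 else 0) + pvScanRuns rest
  termination_by l => l.length
  decreasing_by
    simp only [List.length_cons]
    exact Nat.lt_succ_of_le (xs.dropWhile_sublist _).length_le

def is2par_alt (cards : List String) : Bool :=
  -- ranks = sorted(card[0] for card in cards)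
  let ranks := PySem.List.sorted (cards.map pvRank) (fun x => x) false
  -- pairs = 0; i = 0; while i < n: ...; return pairs == 2
  decide (pvScanRuns ranks = 2)

-- ===== PRECONDITION & SPEC =====
-- Pre_ excludes lists containing an empty string: there card[0] raises IndexError in A (and in B).
def Pre_is2par (cards : List String) : Prop := ∀ card ∈ cards, card.toList ≠ []
instance (cards : List String) : Decidable (Pre_is2par cards) := by unfold Pre_is2par; infer_instance
def pvWitness_is2par : List String := ["Ah", "As", "Kd", "Kc", "7s"]

def Spec_is2par (cards : List String) (out : Bool) : Prop := out = is2par_alt cards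
instance (cards : List String) (out : Bool) : Decidable (Spec_is2par cards out) := by unfold Spec_is2par; infer_instance

-- ===== CLAIM (what is proved, stated in full; the proofs are below) =====
def Claim_equal_is2par : Prop := ∀ (cards : List String), Dom_is2par cards → Pre_is2par cards → Spec_is2par cards (is2par cards)

-- ===== LEMMAS AND PROOFS =====

-- the order-free quantity both programs compute: the number of distinct characters
-- of l occurring more than once in l
def pvDupCard (l : List Char) : Nat := (l.toFinset.filter (fun ch => 1 < l.count ch)).card

-- A's result: the number of distinct first-chars occurring more than once, compared to 2
lemma is2par_eq (cards : List String) :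
    is2par cards = decide (pvDupCard (cards.map pvRank) = 2) := by
  unfold is2par
  dsimp only []
  have h1 : (PySem.List.pyRange 0 (PySem.List.len cards) 1).foldl
      (fun acc c => acc ++ [pvRank (PySem.List.pyGetD cards c "")]) []
      = cards.map pvRank := by
    have := PySem.List.foldl_pyRange_pyGetD cards ""
      (fun acc card => acc ++ [pvRank card]) [] (a := 0) (by norm_num)
    simpa only [Int.toNat_zero, List.drop_zero,
      PySem.List.foldl_append_singleton_eq_map, List.nil_append] using this
  rw [h1]
  set a := cards.map pvRank with ha
  have h2 : (PySem.List.pyRange 0 (PySem.List.len a) 1).foldl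
      (fun rep c =>
        if a.count (PySem.List.pyGetD a c ' ') > 1 then
          if (PySem.List.pyGetD a c ' ') ∈ rep then rep
          else rep ++ [PySem.List.pyGetD a c ' ']
        else rep) []
      = a.foldl (fun rep ch =>
          if a.count ch > 1 then
            if ch ∈ rep then rep else rep ++ [ch]
          else rep) [] := by
    have := PySem.List.foldl_pyRange_pyGetD a ' '
      (fun rep ch => if a.count ch > 1 then
          if ch ∈ rep then rep else rep ++ [ch] else rep) [] (a := 0) (by norm_num)
    simpa only [Int.toNat_zero, List.drop_zero] using this
  rw [h2]
  have h3 : a.foldl (fun rep ch =>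
        if a.count ch > 1 then
          if ch ∈ rep then rep else rep ++ [ch]
        else rep) []
      = PySem.Set.ofList (a.filter (fun ch => decide (1 < a.count ch))) := by
    rw [PySem.Set.ofList_eq_foldl, List.foldl_filter]
    simp only [PySem.Set.add_eq_ite, decide_eq_true_eq, gt_iff_lt]
  rw [h3]
  have h4 : (PySem.Set.ofList (a.filter (fun ch => decide (1 < a.count ch)))).length
      = pvDupCard a := by
    rw [← List.toFinset_card_of_nodup (PySem.Set.nodup_ofList _)]
    have he : (PySem.Set.ofList (a.filter (fun ch => decide (1 < a.count ch)))).toFinset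
        = (a.filter (fun ch => decide (1 < a.count ch))).toFinset := by
      ext z; simp [PySem.Set.mem_ofList]
    rw [he, List.toFinset_filter, pvDupCard]
    congr 1
    ext z; simp
  rw [h4]

-- in a ≤-sorted list, x does not reappear after dropWhile (== x)
lemma not_mem_dropWhile_of_sorted (x : Char) (xs : List Char)
    (h : (x :: xs).Pairwise (· ≤ ·)) : x ∉ xs.dropWhile (fun y => y == x) := by
  intro hmem
  have hsub : List.Sublist (xs.dropWhile (fun y => y == x)) xs := List.dropWhile_sublist _
  cases hrest : xs.dropWhile (fun y => y == x) with
  | nil => rw [hrest] at hmem; exact absurd hmem List.not_mem_nil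
  | cons y t =>
    have hne : xs.dropWhile (fun y => y == x) ≠ [] := by simp [hrest]
    have hy := List.head_dropWhile_not (fun y => y == x) hne
    rw [hrest] at hmem hsub
    simp only [hrest, List.head_cons, beq_eq_false_iff_ne, ne_eq] at hy
    have hxle : ∀ z ∈ xs, x ≤ z := (List.pairwise_cons.mp h).1
    have hyx : x < y :=
      lt_of_le_of_ne (hxle y (hsub.subset (List.mem_cons_self))) (fun hh => hy hh.symm)
    have hpw : (y :: t).Pairwise (· ≤ ·) := ((List.pairwise_cons.mp h).2).sublist hsub
    rcases List.mem_cons.mp hmem with rfl | hmem'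
    · exact absurd hyx (lt_irrefl x)
    · exact absurd hyx (not_lt.mpr ((List.pairwise_cons.mp hpw).1 x hmem'))

-- run-length scan on a sorted list = the number of distinct duplicated elements
lemma pvScanRuns_sorted_aux (n : Nat) : ∀ (s : List Char), s.length ≤ n →
    s.Pairwise (· ≤ ·) → pvScanRuns s = pvDupCard s := by
  induction n with
  | zero =>
    intro s hs _
    rw [List.length_eq_zero_iff.mp (Nat.le_zero.mp hs)]
    simp [pvScanRuns, pvDupCard]
  | succ n ihn =>
    intro s hs h
    cases s with
    | nil => simp [pvScanRuns, pvDupCard]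
    | cons x xs =>
    rw [pvScanRuns]
    set run := xs.takeWhile (fun y => y == x) with hrun_def
    set rest := xs.dropWhile (fun y => y == x) with hrest_def
    have hsplit : run ++ rest = xs := List.takeWhile_append_dropWhile
    have hrun : ∀ y ∈ run, y = x := by
      intro y hy
      have := List.mem_takeWhile_imp hy
      simpa using this
    have hx : x ∉ rest := not_mem_dropWhile_of_sorted x xs h
    have hrest_sub : List.Sublist rest xs := List.dropWhile_sublist _
    have hpw : rest.Pairwise (· ≤ ·) := ((List.pairwise_cons.mp h).2).sublist hrest_sub
    have hlen : rest.length ≤ n := by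
      have := hrest_sub.length_le
      simp only [List.length_cons] at hs
      omega
    rw [ihn rest hlen hpw]
    -- count facts
    have hcx : (x :: xs).count x = run.length + 1 := by
      rw [List.count_cons_self, ← hsplit, List.count_append]
      have h1 : run.count x = run.length := List.count_eq_length.mpr (fun b hb => (hrun b hb).symm)
      have h2 : rest.count x = 0 := List.count_eq_zero.mpr hx
      omega
    have hcz : ∀ z, z ≠ x → (x :: xs).count z = rest.count z := by
      intro z hz
      rw [List.count_cons_of_ne hz.symm, ← hsplit, List.count_append]
      have : run.count z = 0 := List.count_eq_zero.mpr (fun hzin => hz (hrun z hzin))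
      omega
    -- toFinset fact
    have hfin : (x :: xs).toFinset = insert x rest.toFinset := by
      ext z
      simp only [List.toFinset_cons, Finset.mem_insert, List.mem_toFinset, ← hsplit,
        List.mem_append]
      constructor
      · rintro (rfl | hz | hz)
        · exact Or.inl rfl
        · exact Or.inl (hrun z hz)
        · exact Or.inr hz
      · rintro (rfl | hz)
        · exact Or.inl rfl
        · exact Or.inr (Or.inr hz)
    -- the filtered finset over rest uses rest-counts
    have hfilter : rest.toFinset.filter (fun ch => 1 < (x :: xs).count ch)
        = rest.toFinset.filter (fun ch => 1 < rest.count ch) := by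
      apply Finset.filter_congr
      intro z hz
      have hzx : z ≠ x := fun hh => hx (hh ▸ List.mem_toFinset.mp hz)
      rw [hcz z hzx]
    have hxnot : x ∉ rest.toFinset.filter (fun ch => 1 < rest.count ch) := by
      intro hh
      exact hx (List.mem_toFinset.mp (Finset.mem_of_mem_filter x hh))
    rw [pvDupCard, pvDupCard, hfin, Finset.filter_insert]
    by_cases hp : 1 < (x :: xs).count x
    · rw [if_pos hp, hfilter, Finset.card_insert_of_notMem (hfilter ▸ hxnot)]
      have : 0 < run.length := by omega
      rw [if_pos (by omega)]
      omega
    · rw [if_neg hp, hfilter]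
      have : run.length = 0 := by omega
      rw [if_neg (by omega)]
      omega

lemma pvScanRuns_sorted (s : List Char) (h : s.Pairwise (· ≤ ·)) :
    pvScanRuns s = pvDupCard s :=
  pvScanRuns_sorted_aux s.length s (Nat.le_refl _) h

-- pvDupCard is invariant under permutation
lemma pvDupCard_perm (l1 l2 : List Char) (h : l1.Perm l2) : pvDupCard l1 = pvDupCard l2 := by
  unfold pvDupCard
  rw [List.toFinset_eq_of_perm l1 l2 h]
  congr 1
  apply Finset.filter_congr
  intro z _
  rw [h.count_eq]

-- B's result: the same count, via sort + run scan
lemma is2par_alt_eq (cards : List String) :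
    is2par_alt cards = decide (pvDupCard (cards.map pvRank) = 2) := by
  unfold is2par_alt
  dsimp only []
  have hpw : (PySem.List.sorted (cards.map pvRank) (fun x => x) false).Pairwise (· ≤ ·) := by
    have := PySem.List.sorted_pairwise (cards.map pvRank) (fun x => x)
    simpa using this
  rw [pvScanRuns_sorted _ hpw,
    pvDupCard_perm _ _ (PySem.List.sorted_perm (cards.map pvRank) (fun x => x) false)]

-- ===== VERDICT (by name: the statement is the Claim_ definition above) =====
theorem is2par_spec : Claim_equal_is2par := by
  intro cards _ _
  unfold Spec_is2par
  rw [is2par_eq, is2par_alt_eq]
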